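-- pv_equiv track=rewrite | github.com/markusle56/Advent-of-Code-2025 | day6.py | part2
-- ===== SOURCE A (Python) =====
-- def multiply(row):
--     product = 1
--     for i in row:
--         product *= int(i)
--     return product
--
-- def sum_row(row):
--     total = 0
--     for i in row:
--         total += int(i)
--     return total
--
-- def isEmptyCol(grid, i):
--     for j in range(len(grid)):
--         if grid[j][i] != " ":
--             return False
--     return True
--
-- def colNum2RowNum(grid):
--     row = []
--     new_grid = []
--     n = len(grid)
--     m = len(grid[0])
--     for i in range(m):
--         if isEmptyCol(grid, i):
--             new_grid.append(row)
--             row = []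
--         else:
--             num = ""
--             for j in range(n):
--                 if grid[j][i] != " ":
--                     num += grid[j][i]
--             row.append(num)
--     new_grid.append(row)
--     return new_grid
--
-- def part2(puzzle):
--     instruction = puzzle[-1].split()
--     puzzle = colNum2RowNum(puzzle[:-1])
--     total = 0
--     for i in range(len(instruction)):
--         if instruction[i] == "+":
--             total += sum_row(puzzle[i])
--         else:
--             total += multiply(puzzle[i])
--
--     return total
--     return
-- ===== SOURCE B (Python) =====
-- def part2(puzzle):
--     # Token-driven single pass: one column pointer walks left to right, each
--     # operator consumes its number group in-stream; no intermediate grid is built.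
--     rows = puzzle[:-1]
--     tokens = puzzle[-1].split()
--     width = len(rows[0])
--     total = 0
--     i = 0
--     for op in tokens:
--         acc = 0 if op == "+" else 1
--         while i < width:
--             s = "".join(r[i] for r in rows if r[i] != " ")
--             i += 1
--             if not s:
--                 break
--             acc = acc + int(s) if op == "+" else acc * int(s)
--         total += acc
--     return total
-- ===== Notes on version B (the rewrite author's own statement) =====
-- stated objective: alternative
-- what changed: A materialises the whole grid of number-strings in a first phase (with an isEmptyCol rescan of every column) and then loops over instruction indices dispatching sum_row/multiply on puzzle[i]; B never builds that structure: a single token-driven pass keeps one column pointer, and each operator consumes its own number group in-stream, folding each number into an accumulator seeded with the operator's identity (0 for +, 1 for *).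
import Mathlib
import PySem

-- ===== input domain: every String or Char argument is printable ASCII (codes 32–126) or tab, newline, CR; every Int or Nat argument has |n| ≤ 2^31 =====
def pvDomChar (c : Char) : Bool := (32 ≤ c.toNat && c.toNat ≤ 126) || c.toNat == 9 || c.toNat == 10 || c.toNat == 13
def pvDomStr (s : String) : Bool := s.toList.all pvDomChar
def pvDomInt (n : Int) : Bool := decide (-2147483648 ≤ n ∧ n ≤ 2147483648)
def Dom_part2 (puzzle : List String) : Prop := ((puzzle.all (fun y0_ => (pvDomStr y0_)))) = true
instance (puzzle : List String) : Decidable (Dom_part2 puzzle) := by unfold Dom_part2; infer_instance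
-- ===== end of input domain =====

-- B replaces A's two phases (materialise the whole grid of number-strings, then loop over
-- instruction indices) by one token-driven pass: a single column pointer walks left to right and
-- each operator consumes its own number group in-stream into an accumulator seeded with the
-- operator's identity; equivalence is about the return value only.

-- ===== PORT A =====
-- int(i) is ported as (ofStr?).getD 0: exact wherever int() succeeds; where int() raises
-- (ofStr? = none) the input is outside Pre_part2.
def pvMultiply (row : List String) : Int :=
  row.foldl (fun p s => p * (PySem.Int.ofStr? s).getD 0) 1

def pvSumRow (row : List String) : Int :=
  row.foldl (fun t s => t + (PySem.Int.ofStr? s).getD 0) 0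

-- grid[j][i] is ported as getD with default ' '; out-of-range access (IndexError) is outside Pre_part2.
def pvIsEmptyCol (g : List (List Char)) (i : Nat) : Bool :=
  (List.range g.length).all (fun j => ((g.getD j []).getD i ' ') == ' ')

-- the string num is accumulated as its list of characters and packed by String.ofList at the end (same value)
def pvColNum2RowNum (g : List (List Char)) : List (List String) :=
  match (List.range ((g.getD 0 []).length)).foldl (fun (st : List (List String) × List String) i =>
      if pvIsEmptyCol g i then (st.1 ++ [st.2], [])
      else (st.1, st.2 ++ [String.ofList ((List.range g.length).foldl (fun acc j =>
        if ((g.getD j []).getD i ' ') ≠ ' ' then acc ++ [(g.getD j []).getD i ' '] else acc) [])]))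
    ([], []) with
  | (new_grid, row) => new_grid ++ [row]

def part2 (puzzle : List String) : Int :=
  let instruction := PySem.Str.split₀ (PySem.List.pyGetD puzzle (-1) "")
  let pz := pvColNum2RowNum ((puzzle.dropLast).map String.toList)
  (List.range instruction.length).foldl (fun total i =>
    if instruction.getD i "" == "+" then total + pvSumRow (pz.getD i [])
    else total + pvMultiply (pz.getD i [])) 0

-- ===== PORT B =====
-- "".join(r[i] for r in rows if r[i] != " "), kept as a list of characters;
-- r[i] is ported as getD ' ' (IndexError on a too-short row is outside Pre_part2)
def pvNumAt (rows : List (List Char)) (i : Nat) : List Char :=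
  (rows.map (fun r => r.getD i ' ')).filter (fun c => c ≠ ' ')

-- acc = acc + int(s) if op == "+" else acc * int(s); int as in port A (outside Pre_ where it raises)
def pvStep (op : String) (acc : Int) (s : List Char) : Int :=
  if op == "+" then acc + (PySem.Int.ofChars? s).getD 0 else acc * (PySem.Int.ofChars? s).getD 0

-- the inner while loop: consume columns from index i until an empty column (or the right edge),
-- returning the finished accumulator and the new column pointer
def pvWhile (rows : List (List Char)) (width : Nat) (op : String) (i : Nat) (acc : Int) : Int × Nat :=
  if _h : i < width then
    let s := pvNumAt rows i
    if s.isEmpty then (acc, i + 1)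
    else pvWhile rows width op (i + 1) (pvStep op acc s)
  else (acc, i)
termination_by width - i

def part2_alt (puzzle : List String) : Int :=
  let rows := (puzzle.dropLast).map String.toList
  let tokens := PySem.Str.split₀ (PySem.List.pyGetD puzzle (-1) "")
  let width := (rows.getD 0 []).length
  (tokens.foldl (fun (st : Int × Nat) op =>
      let r := pvWhile rows width op st.2 (if op == "+" then (0 : Int) else 1)
      (st.1 + r.1, r.2)) (0, 0)).1

-- ===== PRECONDITION & SPEC =====
-- helpers for stating Pre_ (shared by neither port)
def preRows (puzzle : List String) : List (List Char) := (puzzle.dropLast).map String.toList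
def preInstr (puzzle : List String) : List String :=
  PySem.Str.split₀ (PySem.List.pyGetD puzzle (-1) "")
def preCol (rows : List (List Char)) (i : Nat) : List Char :=
  (rows.map (fun r => r.getD i ' ')).filter (fun c => c ≠ ' ')
def preCols (puzzle : List String) : List (List Char) :=
  (List.range ((preRows puzzle).getD 0 []).length).map (preCol (preRows puzzle))

-- Pre_part2: exactly the inputs on which the Python A returns normally: at least a grid row and the
-- instruction line; no grid row shorter than the first (IndexError otherwise); no more instruction
-- tokens than number groups (IndexError otherwise); every column number that an instruction token
-- actually consumes parses as a Python int (ValueError otherwise).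
def Pre_part2 (puzzle : List String) : Prop :=
  2 ≤ puzzle.length ∧
  (∀ r ∈ preRows puzzle, ((preRows puzzle).getD 0 []).length ≤ r.length) ∧
  (preInstr puzzle).length ≤ (preCols puzzle).countP (fun c => c.isEmpty) + 1 ∧
  ∀ i < ((preRows puzzle).getD 0 []).length,
    (preCol (preRows puzzle) i ≠ [] ∧
     ((preCols puzzle).take i).countP (fun c => c.isEmpty) < (preInstr puzzle).length) →
    (PySem.Int.ofChars? (preCol (preRows puzzle) i)).isSome = true

instance (puzzle : List String) : Decidable (Pre_part2 puzzle) := by unfold Pre_part2; infer_instance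

def pvWitness_part2 : List String := ["1 2", "3 4", "+ *"]

def Spec_part2 (puzzle : List String) (out : Int) : Prop := out = part2_alt puzzle
instance (puzzle : List String) (out : Int) : Decidable (Spec_part2 puzzle out) := by unfold Spec_part2; infer_instance

-- ===== CLAIM (what is proved, stated in full; the proofs are below) =====
def Claim_equal_part2 : Prop := ∀ (puzzle : List String), Dom_part2 puzzle → Pre_part2 puzzle → Spec_part2 puzzle (part2 puzzle)


-- ===== LEMMAS AND PROOFS =====

-- ---- proof-side vocabulary ----

-- the column list of a grid
def pvColsOf (g : List (List Char)) : List (List Char) :=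
  (List.range ((g.getD 0 []).length)).map (pvNumAt g)

-- the grouping A effectively performs, as the foldl its code runs
def pvGroups (cols : List (List Char)) : List (List (List Char)) :=
  match cols.foldl (fun (st : List (List (List Char)) × List (List Char)) c =>
      if c.isEmpty then (st.1 ++ [st.2], []) else (st.1, st.2 ++ [c])) ([], []) with
  | (done, cur) => done ++ [cur]

-- the same grouping as a structural recursion
def groupsR : List (List Char) → List (List (List Char))
  | [] => [[]]
  | c :: t =>
    if c.isEmpty then [] :: groupsR t
    else match groupsR t with
      | g :: gs => (c :: g) :: gs
      | [] => [[c]]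

-- B's inner while loop on the column LIST (index-free view)
def listW (op : String) : List (List Char) → Int → Int × List (List Char)
  | [], acc => (acc, [])
  | c :: t, acc => if c.isEmpty then (acc, t) else listW op t (pvStep op acc c)

-- B's whole pass on the column list
def listGo : List String → List (List Char) → Int
  | [], _ => 0
  | op :: ops, L =>
    let r := listW op L (if op == "+" then (0 : Int) else 1)
    r.1 + listGo ops r.2

-- ---- generic helpers ----

theorem lemma_map_range_getD {α : Type} (g : List α) (d : α) :
    (List.range g.length).map (fun j => g.getD j d) = g := by
  apply List.ext_getElem
  · simp
  · intro k h1 h2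
    simp [List.getD_eq_getElem?_getD, List.getElem?_eq_getElem h2]

-- ---- A-side: colNum2RowNum in terms of pvGroups ∘ pvColsOf ----

theorem pv_foldl_filter (l acc : List Char) :
    l.foldl (fun acc c => if c ≠ ' ' then acc ++ [c] else acc) acc
      = acc ++ l.filter (fun c => c ≠ ' ') := by
  induction l generalizing acc with
  | nil => simp
  | cons c t ih =>
    simp only [List.foldl_cons, List.filter_cons]
    by_cases h : c = ' '
    · rw [if_neg (by simp [h]), ih]; simp [h]
    · rw [if_pos h, ih]; simp [h]

theorem pv_map_range_col (g : List (List Char)) (i : Nat) :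
    (List.range g.length).map (fun j => (g.getD j []).getD i ' ')
      = g.map (fun r => r.getD i ' ') := by
  have := lemma_map_range_getD g []
  calc (List.range g.length).map (fun j => (g.getD j []).getD i ' ')
      = ((List.range g.length).map (fun j => g.getD j [])).map (fun r => r.getD i ' ') := by
        rw [List.map_map]; rfl
    _ = g.map (fun r => r.getD i ' ') := by rw [this]

theorem pv_colA_eq (g : List (List Char)) (i : Nat) :
    (List.range g.length).foldl (fun acc j =>
        if ((g.getD j []).getD i ' ') ≠ ' ' then acc ++ [(g.getD j []).getD i ' '] else acc) []
      = pvNumAt g i := by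
  calc (List.range g.length).foldl (fun acc j =>
          if ((g.getD j []).getD i ' ') ≠ ' ' then acc ++ [(g.getD j []).getD i ' '] else acc) []
      = ((List.range g.length).map (fun j => (g.getD j []).getD i ' ')).foldl
          (fun acc c => if c ≠ ' ' then acc ++ [c] else acc) [] := by rw [List.foldl_map]
    _ = (g.map (fun r => r.getD i ' ')).foldl (fun acc c => if c ≠ ' ' then acc ++ [c] else acc) [] := by
          rw [pv_map_range_col]
    _ = pvNumAt g i := by rw [pv_foldl_filter]; rfl

theorem pv_all_filter (l : List Char) :
    (l.all (fun c => c == ' ')) = (l.filter (fun c => c ≠ ' ')).isEmpty := by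
  induction l with
  | nil => rfl
  | cons c t ih => by_cases h : c = ' ' <;> simp [h, ih]

theorem pv_isEmptyCol_eq (g : List (List Char)) (i : Nat) :
    pvIsEmptyCol g i = (pvNumAt g i).isEmpty := by
  unfold pvIsEmptyCol pvNumAt
  calc (List.range g.length).all (fun j => ((g.getD j []).getD i ' ') == ' ')
      = ((List.range g.length).map (fun j => (g.getD j []).getD i ' ')).all (fun c => c == ' ') := by
        rw [List.all_map]; rfl
    _ = (g.map (fun r => r.getD i ' ')).all (fun c => c == ' ') := by rw [pv_map_range_col]
    _ = ((g.map (fun r => r.getD i ' ')).filter (fun c => c ≠ ' ')).isEmpty := pv_all_filter _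

theorem pv_foldl_hom {ι σA σB : Type} (F : σB → σA) (fA : σA → ι → σA) (fB : σB → ι → σB)
    (l : List ι) (h : ∀ s i, fA (F s) i = F (fB s i)) :
    ∀ s, l.foldl fA (F s) = F (l.foldl fB s) := by
  induction l with
  | nil => intro s; rfl
  | cons a t ih => intro s; simp only [List.foldl_cons, h]; exact ih _

theorem pv_colNum2RowNum_eq (g : List (List Char)) :
    pvColNum2RowNum g = (pvGroups (pvColsOf g)).map (List.map String.ofList) := by
  show ((List.range ((g.getD 0 []).length)).foldl _ (([], []) : List (List String) × List String)).1 ++ [((List.range ((g.getD 0 []).length)).foldl _ (([], []) : List (List String) × List String)).2] = _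
  unfold pvGroups pvColsOf
  rw [List.foldl_map]
  have h := pv_foldl_hom
    (F := fun (s : List (List (List Char)) × List (List Char)) =>
      (s.1.map (List.map String.ofList), s.2.map String.ofList))
    (fA := fun (st : List (List String) × List String) i =>
      if pvIsEmptyCol g i then (st.1 ++ [st.2], [])
      else (st.1, st.2 ++ [String.ofList ((List.range g.length).foldl (fun acc j =>
        if ((g.getD j []).getD i ' ') ≠ ' ' then acc ++ [(g.getD j []).getD i ' '] else acc) [])]))
    (fB := fun (st : List (List (List Char)) × List (List Char)) i =>
      if (pvNumAt g i).isEmpty then (st.1 ++ [st.2], []) else (st.1, st.2 ++ [pvNumAt g i]))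
    (l := List.range ((g.getD 0 []).length))
    (fun s i => by
      simp only [pv_colA_eq, pv_isEmptyCol_eq]
      by_cases h : (pvNumAt g i).isEmpty <;> simp [h])
    ([], [])
  simp only [List.map_nil] at h
  rw [h]
  simp

-- ---- pvGroups = groupsR, and its length ----

theorem groupsR_nil : groupsR [] = [[]] := rfl

theorem groupsR_cons_empty (c : List Char) (t : List (List Char)) (h : c.isEmpty = true) :
    groupsR (c :: t) = [] :: groupsR t := by
  conv_lhs => rw [groupsR]
  rw [if_pos h]

theorem groupsR_cons_nonempty (c : List Char) (t : List (List Char)) (g : List (List Char))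
    (gs : List (List (List Char))) (h : ¬ c.isEmpty = true) (hg : groupsR t = g :: gs) :
    groupsR (c :: t) = (c :: g) :: gs := by
  conv_lhs => rw [groupsR]
  rw [if_neg h, hg]

theorem groupsR_ne_nil (cols : List (List Char)) : groupsR cols ≠ [] := by
  induction cols with
  | nil => simp [groupsR_nil]
  | cons c t ih =>
    by_cases h : c.isEmpty
    · rw [groupsR_cons_empty c t h]; simp
    · cases hgt : groupsR t with
      | nil => exact absurd hgt ih
      | cons g gs => rw [groupsR_cons_nonempty c t g gs h hgt]; simp

-- consHead cur prepends cur to the first group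
def consHead (cur : List (List Char)) (l : List (List (List Char))) : List (List (List Char)) :=
  match l with
  | g :: gs => (cur ++ g) :: gs
  | [] => [cur]

theorem pv_groups_aux :
    ∀ (cols : List (List Char)) (done : List (List (List Char))) (cur : List (List Char)),
    (cols.foldl (fun (st : List (List (List Char)) × List (List Char)) c =>
        if c.isEmpty then (st.1 ++ [st.2], []) else (st.1, st.2 ++ [c])) (done, cur)).1
      ++ [(cols.foldl (fun (st : List (List (List Char)) × List (List Char)) c =>
        if c.isEmpty then (st.1 ++ [st.2], []) else (st.1, st.2 ++ [c])) (done, cur)).2]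
      = done ++ consHead cur (groupsR cols) := by
  intro cols
  induction cols with
  | nil => intro done cur; simp [groupsR_nil, consHead]
  | cons c t ih =>
    intro done cur
    rw [List.foldl_cons]
    by_cases h : c.isEmpty
    · simp only [h, if_pos]
      rw [ih, groupsR_cons_empty c t h]
      cases hgt : groupsR t with
      | nil => exact absurd hgt (groupsR_ne_nil t)
      | cons g gs => simp [consHead]
    · simp only [h, Bool.false_eq_true, if_false]
      rw [ih]
      cases hgt : groupsR t with
      | nil => exact absurd hgt (groupsR_ne_nil t)
      | cons g gs =>
        rw [groupsR_cons_nonempty c t g gs h hgt]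
        simp [consHead]

theorem pv_groups_eq (cols : List (List Char)) : pvGroups cols = groupsR cols := by
  show (cols.foldl _ (([], []) : List (List (List Char)) × List (List Char))).1
      ++ [(cols.foldl _ (([], []) : List (List (List Char)) × List (List Char))).2] = _
  rw [pv_groups_aux cols [] []]
  cases hgt : groupsR cols with
  | nil => exact absurd hgt (groupsR_ne_nil cols)
  | cons g gs => simp [consHead]

theorem groupsR_length (cols : List (List Char)) :
    (groupsR cols).length = cols.countP (fun c => c.isEmpty) + 1 := by
  induction cols with
  | nil => simp [groupsR_nil]
  | cons c t ih =>
    by_cases h : c.isEmpty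
    · rw [groupsR_cons_empty c t h]
      simp [h, ih]
    · cases hgt : groupsR t with
      | nil => exact absurd hgt (groupsR_ne_nil t)
      | cons g gs =>
        rw [groupsR_cons_nonempty c t g gs h hgt]
        rw [hgt] at ih
        simp only [List.length_cons] at ih ⊢
        simp [h]
        omega

-- ---- characterisations via takeWhile / dropWhile ----

theorem listW_char (op : String) :
    ∀ (cols : List (List Char)) (acc : Int),
    listW op cols acc
      = ((cols.takeWhile (fun c => !c.isEmpty)).foldl (pvStep op) acc,
         (cols.dropWhile (fun c => !c.isEmpty)).tail) := by
  intro cols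
  induction cols with
  | nil => intro acc; simp [listW]
  | cons c t ih =>
    intro acc
    unfold listW
    by_cases h : c.isEmpty
    · simp [h]
    · simp [h, ih]

theorem groupsR_drop_nil :
    ∀ (cols : List (List Char)), cols.dropWhile (fun c => !c.isEmpty) = [] →
    groupsR cols = [cols.takeWhile (fun c => !c.isEmpty)] := by
  intro cols
  induction cols with
  | nil => intro _; simp [groupsR_nil]
  | cons c t ih =>
    intro h
    by_cases hc : c.isEmpty
    · rw [List.dropWhile_cons_of_neg (by simp [hc])] at h
      exact absurd h (by simp)
    · rw [List.dropWhile_cons_of_pos (by simp [hc])] at h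
      rw [List.takeWhile_cons_of_pos (by simp [hc])]
      cases hgt : groupsR t with
      | nil => exact absurd hgt (groupsR_ne_nil t)
      | cons g gs =>
        have hthis := ih h
        rw [hgt] at hthis
        injection hthis with h1 h2
        rw [groupsR_cons_nonempty c t g gs hc hgt, h1, h2]

theorem groupsR_drop_cons :
    ∀ (cols : List (List Char)) (e : List Char) (rest : List (List Char)),
    cols.dropWhile (fun c => !c.isEmpty) = e :: rest →
    groupsR cols = cols.takeWhile (fun c => !c.isEmpty) :: groupsR rest := by
  intro cols
  induction cols with
  | nil => intro e rest h; simp at h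
  | cons c t ih =>
    intro e rest h
    by_cases hc : c.isEmpty
    · rw [List.dropWhile_cons_of_neg (by simp [hc])] at h
      injection h with h1 h2
      subst h2
      rw [groupsR_cons_empty c t hc, List.takeWhile_cons_of_neg (by simp [hc])]
    · rw [List.dropWhile_cons_of_pos (by simp [hc])] at h
      rw [List.takeWhile_cons_of_pos (by simp [hc])]
      cases hgt : groupsR t with
      | nil => exact absurd hgt (groupsR_ne_nil t)
      | cons g gs =>
        have hthis := ih e rest h
        rw [hgt] at hthis
        injection hthis with h1 h2
        rw [groupsR_cons_nonempty c t g gs hc hgt, h1, h2]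

-- ---- shifting the additive accumulator out of the zip fold ----

theorem pv_fold_add_shift (l : List (String × List String)) :
    ∀ (a : Int),
    l.foldl (fun total p =>
        if p.1 == "+" then total + pvSumRow p.2 else total + pvMultiply p.2) a
      = a + l.foldl (fun total p =>
          if p.1 == "+" then total + pvSumRow p.2 else total + pvMultiply p.2) 0 := by
  induction l with
  | nil => intro a; simp
  | cons x t ih =>
    intro a
    simp only [List.foldl_cons]
    by_cases h : x.1 == "+"
    · rw [if_pos h, if_pos h, ih, ih (0 + _)]; ring
    · rw [if_neg h, if_neg h, ih, ih (0 + _)]; ring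

-- reducing one group: A's helper on the packed strings = B's in-stream fold
theorem pv_red_eq (op : String) (g : List (List Char)) :
    (if op == "+" then pvSumRow (g.map String.ofList) else pvMultiply (g.map String.ofList))
      = g.foldl (pvStep op) (if op == "+" then (0 : Int) else 1) := by
  unfold pvSumRow pvMultiply pvStep
  by_cases h : op == "+" <;>
    simp [h, List.foldl_map, PySem.Int.ofStr?]

-- ---- B's list-level pass equals the zip fold over the groups ----

theorem listGo_eq_zipfold :
    ∀ (ops : List String) (cols : List (List Char)),
    ops.length ≤ (groupsR cols).length →
    listGo ops cols
      = (ops.zip ((groupsR cols).map (List.map String.ofList))).foldl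
          (fun total p =>
            if p.1 == "+" then total + pvSumRow p.2 else total + pvMultiply p.2) 0 := by
  intro ops
  induction ops with
  | nil => intro cols _; simp [listGo]
  | cons op ops ih =>
    intro cols hlen
    unfold listGo
    rw [listW_char]
    cases hdrop : cols.dropWhile (fun c => !c.isEmpty) with
    | nil =>
      rw [groupsR_drop_nil cols hdrop] at hlen ⊢
      have hops : ops = [] := by
        cases ops with
        | nil => rfl
        | cons a l => simp at hlen
      subst hops
      simp only [listGo, List.map_cons, List.map_nil, List.zip_cons_cons, List.zip_nil_right,
        List.foldl_cons, List.foldl_nil]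
      rw [← pv_red_eq op]
      by_cases h : op == "+" <;> simp [h]
    | cons e rest =>
      rw [groupsR_drop_cons cols e rest hdrop] at hlen ⊢
      simp only [List.map_cons, List.zip_cons_cons, List.foldl_cons, List.tail_cons]
      rw [ih rest (by simpa using hlen)]
      conv_rhs => rw [pv_fold_add_shift]
      have hred := pv_red_eq op (cols.takeWhile (fun c => !c.isEmpty))
      by_cases h : op == "+"
      · simp only [h, if_true] at hred ⊢
        rw [hred]
        ring
      · simp only [h, if_false, Bool.false_eq_true] at hred ⊢
        rw [hred]
        ring

-- ---- B's index-level loops equal the list-level ones ----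

theorem pvColsOf_length (g : List (List Char)) :
    (pvColsOf g).length = (g.getD 0 []).length := by
  simp [pvColsOf]

theorem pvColsOf_getElem (g : List (List Char)) (i : Nat) (h : i < (pvColsOf g).length) :
    (pvColsOf g)[i] = pvNumAt g i := by
  simp [pvColsOf]

theorem listW_suffix (op : String) :
    ∀ (L : List (List Char)) (acc : Int), (listW op L acc).2 <:+ L := by
  intro L
  induction L with
  | nil => intro acc; simp [listW]
  | cons c t ih =>
    intro acc
    unfold listW
    by_cases h : c.isEmpty
    · simp [h]
    · simp only [h, Bool.false_eq_true, if_neg, not_false_iff]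
      exact (ih _).trans (List.suffix_cons c t)

theorem pvWhile_eq_listW (rows : List (List Char)) (width : Nat) (op : String)
    (hw : width = (rows.getD 0 []).length) :
    ∀ (n i : Nat) (acc : Int), width - i = n → i ≤ width →
    pvWhile rows width op i acc
      = ((listW op ((pvColsOf rows).drop i) acc).1,
         width - (listW op ((pvColsOf rows).drop i) acc).2.length) := by
  intro n
  induction n with
  | zero =>
    intro i acc hn hle
    have hi : i = width := by omega
    subst hi
    rw [pvWhile]
    rw [List.drop_eq_nil_of_le (by rw [pvColsOf_length, ← hw])]
    simp [listW]
  | succ n ih =>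
    intro i acc hn hle
    have hi : i < width := by omega
    have hiL : i < (pvColsOf rows).length := by rw [pvColsOf_length, ← hw]; exact hi
    rw [pvWhile]
    have hdrop : (pvColsOf rows).drop i = pvNumAt rows i :: (pvColsOf rows).drop (i + 1) := by
      rw [← pvColsOf_getElem rows i hiL]
      exact (List.getElem_cons_drop hiL).symm
    rw [hdrop]
    unfold listW
    by_cases h : (pvNumAt rows i).isEmpty
    · have hlen : ((pvColsOf rows).drop (i + 1)).length = width - (i + 1) := by
        rw [List.length_drop, pvColsOf_length, ← hw]
      simp [hi, h, hlen]
      omega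
    · simp only [hi, dif_pos, h, Bool.false_eq_true, if_neg, not_false_iff]
      exact ih (i + 1) (pvStep op acc (pvNumAt rows i)) (by omega) (by omega)

theorem pv_fold_tokens_eq (rows : List (List Char)) (width : Nat)
    (hw : width = (rows.getD 0 []).length) :
    ∀ (ops : List String) (total : Int) (i : Nat), i ≤ width →
    (ops.foldl (fun (st : Int × Nat) op =>
        let r := pvWhile rows width op st.2 (if op == "+" then (0 : Int) else 1)
        (st.1 + r.1, r.2)) (total, i)).1
      = total + listGo ops ((pvColsOf rows).drop i) := by
  intro ops
  induction ops with
  | nil => intro total i _; simp [listGo]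
  | cons op ops ih =>
    intro total i hle
    rw [List.foldl_cons]
    rw [pvWhile_eq_listW rows width op hw (width - i) i _ rfl hle]
    set r := listW op ((pvColsOf rows).drop i) (if op == "+" then (0 : Int) else 1) with hr
    have hsuf : r.2 <:+ pvColsOf rows := by
      exact (listW_suffix op _ _).trans (List.drop_suffix i _)
    have hlen2 : r.2.length ≤ width := by
      have := hsuf.length_le
      rw [pvColsOf_length, ← hw] at this
      exact this
    have hdrop2 : (pvColsOf rows).drop (width - r.2.length) = r.2 := by
      have h1 := (List.suffix_iff_eq_drop).mp hsuf
      rw [pvColsOf_length, ← hw] at h1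
      exact h1.symm
    rw [ih (total + r.1) (width - r.2.length) (by omega)]
    rw [hdrop2]
    have hgo : listGo (op :: ops) (List.drop i (pvColsOf rows)) = r.1 + listGo ops r.2 := by
      rw [hr]
      rfl
    rw [hgo]
    ring

-- A's index loop over the instructions equals a fold over the zip
theorem pv_zip_fold :
    ∀ (ts : List String) (gs : List (List String)) (acc : Int), ts.length ≤ gs.length →
    (List.range ts.length).foldl (fun total i =>
        if ts.getD i "" == "+" then total + pvSumRow (gs.getD i [])
        else total + pvMultiply (gs.getD i [])) acc
      = (ts.zip gs).foldl (fun s p =>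
          if p.1 == "+" then s + pvSumRow p.2 else s + pvMultiply p.2) acc := by
  intro ts
  induction ts with
  | nil => intro gs acc _; rfl
  | cons t ts ih =>
    intro gs acc h
    cases gs with
    | nil => simp at h
    | cons gr gs =>
      simp only [List.length_cons, List.range_succ_eq_map, List.foldl_cons, List.foldl_map,
        List.getD_cons_zero, List.getD_cons_succ, List.zip_cons_cons]
      exact ih gs _ (by simpa using h)

-- ===== VERDICT (by name: the statement is the Claim_ definition above) =====
theorem part2_spec : Claim_equal_part2 := by
  intro puzzle _ hpre
  unfold Spec_part2 part2 part2_alt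
  obtain ⟨-, -, hlen, -⟩ := hpre
  have hcols : preCols puzzle = pvColsOf ((puzzle.dropLast).map String.toList) := rfl
  rw [hcols] at hlen
  -- A side: fold over zip of tokens with the mapped groups
  rw [pv_colNum2RowNum_eq]
  rw [pv_groups_eq]
  have hbound : (PySem.Str.split₀ (PySem.List.pyGetD puzzle (-1) "")).length
      ≤ ((groupsR (pvColsOf ((puzzle.dropLast).map String.toList))).map (List.map String.ofList)).length := by
    rw [List.length_map, groupsR_length]
    simpa using hlen
  rw [pv_zip_fold _ _ _ hbound]
  -- B side
  rw [pv_fold_tokens_eq _ _ rfl _ 0 0 (Nat.zero_le _)]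
  rw [List.drop_zero, zero_add]
  exact (listGo_eq_zipfold _ _ (by simpa using hbound)).symm
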